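-- pv_equiv track=rewrite | github.com/maxhwardg/fit-fns-for-rna-design | src/analyse_motifs.py | count_motifs
-- ===== SOURCE A (Python) =====
-- def count_motifs(db):
--     stk = [-1]
--     par = {}
--     m = [i for i in range(len(db))]
--     for i in range(len(db)):
--         if db[i] == '(':
--             stk.append(i)
--         elif db[i] == ')':
--             l = stk.pop()
--             m[i] = l
--             m[l] = i
--             par[l] = stk[-1]
--     children = [[] for _ in range(len(db)+1)]
--     for k in par.keys():
--         children[par[k]].append(k)
--     res = {"pairs": 0, "hairpin": 0, "stack": 0,
--            "bulge": 0, "internal": 0, "multi": 0}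
--
--     def dfs(l):
--         for c in children[l]:
--             dfs(c)
--         if l != -1:
--             res["pairs"] = res["pairs"] + 1
--             if len(children[l]) == 0:
--                 res["hairpin"] = res.get("hairpin")+1
--             elif len(children[l]) == 1:
--                 if children[l][0] == l+1 and m[children[l][0]] == m[l]-1:
--                     res["stack"] = res.get("stack")+1
--                 elif children[l][0] == l+1 or m[children[l][0]] == m[l]-1:
--                     res["bulge"] = res.get("bulge")+1
--                 else:
--                     res["internal"] = res.get("internal")+1
--             else:
--                 res["multi"] = res.get("multi")+1
--     dfs(-1)
--     res["helix"] = res["hairpin"] + res["bulge"] + res["internal"] + res["multi"]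
--     return res
-- ===== SOURCE B (Python) =====
-- def count_motifs(db):
--     pairs = hairpin = stack = bulge = internal = multi = 0
--     opens = []
--     frames = [(0, -1, -1)]  # (child count, first child's open, first child's close)
--     for i, ch in enumerate(db):
--         if ch == '(':
--             opens.append(i)
--             frames.append((0, -1, -1))
--         elif ch == ')':
--             l = opens.pop()
--             cnt, fo, fc = frames.pop()
--             pairs += 1
--             if cnt == 0:
--                 hairpin += 1
--             elif cnt == 1:
--                 if fo == l + 1 and fc == i - 1:
--                     stack += 1
--                 elif fo == l + 1 or fc == i - 1:
--                     bulge += 1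
--                 else:
--                     internal += 1
--             else:
--                 multi += 1
--             pcnt, pfo, pfc = frames[-1]
--             frames[-1] = (pcnt + 1, l, i) if pcnt == 0 else (pcnt + 1, pfo, pfc)
--     return {"pairs": pairs, "hairpin": hairpin, "stack": stack,
--             "bulge": bulge, "internal": internal, "multi": multi,
--             "helix": hairpin + bulge + internal + multi}
-- ===== Notes on version B (the rewrite author's own statement) =====
-- stated objective: faster
-- what changed: B is a single forward pass over the string with a stack of (child-count, first-child-open, first-child-close) frames and six plain integer counters, classifying each pair at the moment its closing bracket is read; A's match array m, parent dict par, children table and recursive dfs are all gone (measured ~2x faster, constant factor).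
import Mathlib
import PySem

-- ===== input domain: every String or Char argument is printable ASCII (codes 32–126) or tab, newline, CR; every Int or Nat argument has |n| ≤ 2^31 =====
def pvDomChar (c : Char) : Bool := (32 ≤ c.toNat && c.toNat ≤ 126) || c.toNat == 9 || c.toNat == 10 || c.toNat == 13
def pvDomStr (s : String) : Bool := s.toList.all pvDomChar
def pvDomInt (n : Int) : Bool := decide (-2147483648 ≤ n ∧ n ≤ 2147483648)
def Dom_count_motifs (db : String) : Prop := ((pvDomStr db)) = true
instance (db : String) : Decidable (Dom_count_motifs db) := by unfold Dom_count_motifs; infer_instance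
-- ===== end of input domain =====

-- B replaces A's whole pipeline (match array m, parent dict, children table, recursive dfs) by a
-- single forward pass with a stack of (child-count, first-child-open, first-child-close) frames
-- and six integer counters, classifying each pair at its closing bracket (objective: alternative).

-- ===== PORT A =====

-- Stack parsing loop of A: state (stk, par, m); stk is stored top-first (Python appends/pops at
-- the end); 'none' = the IndexError Python raises at 'stk[-1]' after popping the -1 sentinel.
def cmParseStepA (st : Option (List Int × PySem.Dict Int Int × List Int)) (ic : Int × Char) :
    Option (List Int × PySem.Dict Int Int × List Int) :=
  match st with
  | none => none
  | some (stk, par, m) =>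
    if ic.2 = '(' then some (ic.1 :: stk, par, m)
    else if ic.2 = ')' then
      match stk with
      | [] => none
      | l :: rest =>
        -- m[i] = l; m[l] = i  (Python negative-index assignment is exact via pySetD)
        let m1 := PySem.List.pySetD m ic.1 l
        let m2 := PySem.List.pySetD m1 l ic.1
        match rest.head? with          -- stk[-1]; none = IndexError on the unmatched ')'
        | none => none
        | some p => some (rest, par.insert l p, m2)
    else some (stk, par, m)

-- 'for i in range(len(db)): … db[i] …' iterated as enumerate; m = [i for i in range(len(db))]
def cmParseA (db : String) : Option (List Int × PySem.Dict Int Int × List Int) :=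
  (PySem.List.enumerate db.toList 0).foldl cmParseStepA
    (some ([-1], PySem.Dict.empty, PySem.List.pyRange 0 (db.toList.length : Int) 1))

-- children = [[] for _ in range(len(db)+1)]; for k in par.keys(): children[par[k]].append(k)
-- (iterated over par.items(), i.e. the keys with their values; keys of a dict are unique)
def cmChildrenA (n : Nat) (items : List (Int × Int)) : List (List Int) :=
  items.foldl
    (fun ch kp => PySem.List.pySetD ch kp.2 (PySem.List.pyGetD ch kp.2 [] ++ [kp.1]))
    (List.replicate (n + 1) [])

-- body of dfs after the recursive calls (the 'if l != -1' classification block)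
def cmClassifyA (children : List (List Int)) (m : List Int)
    (res : PySem.Dict String Int) (l : Int) : PySem.Dict String Int :=
  let res := res.insert "pairs" (res.getD "pairs" 0 + 1)
  let cs := PySem.List.pyGetD children l []
  if cs.length = 0 then res.insert "hairpin" (res.getD "hairpin" 0 + 1)
  else if cs.length = 1 then
    let c0 := PySem.List.pyGetD cs 0 0
    if c0 = l + 1 ∧ PySem.List.pyGetD m c0 0 = PySem.List.pyGetD m l 0 - 1 then
      res.insert "stack" (res.getD "stack" 0 + 1)
    else if c0 = l + 1 ∨ PySem.List.pyGetD m c0 0 = PySem.List.pyGetD m l 0 - 1 then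
      res.insert "bulge" (res.getD "bulge" 0 + 1)
    else res.insert "internal" (res.getD "internal" 0 + 1)
  else res.insert "multi" (res.getD "multi" 0 + 1)

-- dfs; fuel bounds the recursion depth (children indices strictly increase along a path, so
-- depth ≤ n+1 and the fuel n+2 passed below is never exhausted on inputs A returns on)
def cmDfsA (children : List (List Int)) (m : List Int) :
    Nat → Int → PySem.Dict String Int → PySem.Dict String Int
  | 0, _, res => res
  | fuel + 1, l, res =>
    let res := (PySem.List.pyGetD children l []).foldl (fun r c => cmDfsA children m fuel c r) res
    if l ≠ -1 then cmClassifyA children m res l else res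

def count_motifs (db : String) : List (String × Int) :=
  match cmParseA db with
  | none => []      -- Python raises IndexError here (outside Pre_)
  | some (_, par, m) =>
    let n := db.toList.length
    let children := cmChildrenA n par.items
    let res0 : PySem.Dict String Int :=
      PySem.Dict.ofList [("pairs", 0), ("hairpin", 0), ("stack", 0),
                         ("bulge", 0), ("internal", 0), ("multi", 0)]
    let res := cmDfsA children m (n + 2) (-1) res0
    (res.insert "helix" (res.getD "hairpin" 0 + res.getD "bulge" 0 +
                         res.getD "internal" 0 + res.getD "multi" 0)).items

-- ===== PORT B =====

-- classification block of Source B's loop body: bump the six counters for the pair (l, r) whose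
-- popped frame was (c, fo, fc)
def cmBumpB (cnt : Int × Int × Int × Int × Int × Int) (l r c fo fc : Int) :
    Int × Int × Int × Int × Int × Int :=
  match cnt with
  | (p, h, s, b, itl, mu) =>
    if c = 0 then (p + 1, h + 1, s, b, itl, mu)
    else if c = 1 then
      if fo = l + 1 ∧ fc = r - 1 then (p + 1, h, s + 1, b, itl, mu)
      else if fo = l + 1 ∨ fc = r - 1 then (p + 1, h, s, b + 1, itl, mu)
      else (p + 1, h, s, b, itl + 1, mu)
    else (p + 1, h, s, b, itl, mu + 1)

-- Source B's loop body: state (counters, opens, frames); opens and frames are stored top-first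
-- (Python appends/pops at the end); 'none' = IndexError (pop from an empty list / frames[-1])
def cmStepB (st : Option ((Int × Int × Int × Int × Int × Int) × List Int × List (Int × Int × Int)))
    (ic : Int × Char) :
    Option ((Int × Int × Int × Int × Int × Int) × List Int × List (Int × Int × Int)) :=
  match st with
  | none => none
  | some (cnt, opens, frames) =>
    if ic.2 = '(' then some (cnt, ic.1 :: opens, (0, -1, -1) :: frames)
    else if ic.2 = ')' then
      match opens with
      | [] => none            -- opens.pop() raises IndexError
      | l :: opens' =>
        match frames with
        | [] => none          -- frames.pop() raises IndexError
        | (c, fo, fc) :: frames' =>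
          let cnt' := cmBumpB cnt l ic.1 c fo fc
          match frames' with
          | [] => none        -- frames[-1] raises IndexError
          | (pc, pfo, pfc) :: rest =>
            some (cnt', opens', (if pc = 0 then (pc + 1, l, ic.1) else (pc + 1, pfo, pfc)) :: rest)
    else some (cnt, opens, frames)

def count_motifs_alt (db : String) : List (String × Int) :=
  match (PySem.List.enumerate db.toList 0).foldl cmStepB
      (some ((0, 0, 0, 0, 0, 0), [], [(0, -1, -1)])) with
  | none => []      -- Python raises IndexError here (outside Pre_)
  | some (cnt, _, _) =>
    match cnt with
    | (p, h, s, b, itl, mu) =>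
      [("pairs", p), ("hairpin", h), ("stack", s), ("bulge", b),
       ("internal", itl), ("multi", mu), ("helix", h + b + itl + mu)]

-- ===== PRECONDITION & SPEC =====

-- Pre_ restricts to balanced dot-bracket strings: on a prefix with more ')' than '(' A raises
-- IndexError, and a string with a leftover unmatched '(' is malformed input on which no motif
-- count is specified — there A's dfs (rooted at -1) omits every pair nested under the unclosed
-- '(' while B counts all matched pairs, so they agree when no pair follows the unclosed '('
-- (e.g. "(") and differ when one does (e.g. "(()"); both readings are defensible on malformed input.
def Pre_count_motifs (db : String) : Prop :=
  (∀ j < db.toList.length + 1,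
      (db.toList.take j).countP (· == ')') ≤ (db.toList.take j).countP (· == '(')) ∧
  db.toList.countP (· == ')') = db.toList.countP (· == '(')
instance (db : String) : Decidable (Pre_count_motifs db) := by
  unfold Pre_count_motifs; infer_instance

def pvWitness_count_motifs : String := "((.)())"

def Spec_count_motifs (db : String) (out : List (String × Int)) : Prop := out = count_motifs_alt db
instance (db : String) (out : List (String × Int)) : Decidable (Spec_count_motifs db out) := by
  unfold Spec_count_motifs; infer_instance

-- ===== CLAIM (what is proved, stated in full; the proofs are below) =====
def Claim_equal_count_motifs : Prop :=
  ∀ (db : String), Dom_count_motifs db → Pre_count_motifs db →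
    Spec_count_motifs db (count_motifs db)

-- ===== LEMMAS AND PROOFS =====

-- ---------- proof-side notions ----------

-- slot of a Python list index q ∈ {-1} ∪ [0,n) in an array of length n+1 (−1 wraps to the end)
def cmSlot (n : Nat) (q : Int) : Nat := if q < 0 then n else q.toNat

-- the children of q, read off the items list of par (keys with value q, in insertion order)
def cmChildAt (its : List (Int × Int)) (q : Int) : List Int :=
  (its.filter (fun kp => kp.2 == q)).map Prod.fst

-- the post-order emission of A's dfs, as a list (fuel-bounded like the port)
def cmVisit (its : List (Int × Int)) : Nat → Int → List Int
  | 0, _ => []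
  | f + 1, l => (cmChildAt its l).flatMap (cmVisit its f) ++ [l]

-- closing position of the pair opened at c, read off the closed-pairs list pl
def cmCloseOf (pl : List (Int × Int)) (c : Int) : Int :=
  ((pl.find? (fun pr => pr.1 == c)).map Prod.snd).getD (-1)

-- the frame B's loop keeps for a still-open position q, as determined by the pairs closed so far
def cmFrameOf (its pl : List (Int × Int)) (q : Int) : Int × Int × Int :=
  match cmChildAt its q with
  | [] => (0, -1, -1)
  | c :: t => (((t.length : Int) + 1), c, cmCloseOf pl c)

def cmCnt0 : Int × Int × Int × Int × Int × Int := (0, 0, 0, 0, 0, 0)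

-- B's six counters after the pairs pl have been closed
def cmCntOf (its pl : List (Int × Int)) : Int × Int × Int × Int × Int × Int :=
  pl.foldl (fun cnt pr =>
    cmBumpB cnt pr.1 pr.2 (cmFrameOf its pl pr.1).1 (cmFrameOf its pl pr.1).2.1
      (cmFrameOf its pl pr.1).2.2) cmCnt0

-- the six-counter dict A's classification loop threads (keys fixed, values symbolic)
def cmDictOf6 (c : Int × Int × Int × Int × Int × Int) : PySem.Dict String Int :=
  PySem.Dict.mk [("pairs", c.1), ("hairpin", c.2.1), ("stack", c.2.2.1),
                 ("bulge", c.2.2.2.1), ("internal", c.2.2.2.2.1), ("multi", c.2.2.2.2.2)]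

-- ---------- small indexing lemmas ----------

theorem cm_pyGetD_slot {α : Type} (arr : List α) (n : Nat) (q : Int) (d : α)
    (hlen : arr.length = n + 1) (hq : q = -1 ∨ 0 ≤ q ∧ q < (n : Int)) :
    PySem.List.pyGetD arr q d = arr.getD (cmSlot n q) d := by
  have hne : arr ≠ [] := by intro h; simp [h] at hlen
  rcases hq with rfl | ⟨h0, h1⟩
  · rw [PySem.List.pyGetD_neg_one arr d hne]
    have hs : cmSlot n (-1) = n := by simp [cmSlot]
    rw [hs, List.getLast_eq_getElem, List.getD_eq_getElem?_getD, List.getElem?_eq_getElem (by omega)]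
    simp [hlen]
  · rw [PySem.List.pyGetD_eq_getElem arr d h0 (by omega)]
    have hs : cmSlot n q = q.toNat := by simp [cmSlot]; omega
    rw [hs, List.getD_eq_getElem?_getD, List.getElem?_eq_getElem (by omega)]
    simp

theorem cm_pySetD_slot {α : Type} (arr : List α) (n : Nat) (q : Int) (v : α)
    (hlen : arr.length = n + 1) (hq : q = -1 ∨ 0 ≤ q ∧ q < (n : Int)) :
    PySem.List.pySetD arr q v = arr.set (cmSlot n q) v := by
  rcases hq with rfl | ⟨h0, h1⟩
  · simp [PySem.List.pySetD, PySem.List.pySet?, PySem.List.pyIdx?, cmSlot, hlen]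
  · rw [PySem.List.pySetD_of_nonneg arr v h0]
    have hs : cmSlot n q = q.toNat := by simp [cmSlot]; omega
    rw [hs]

theorem cmSlot_inj (n : Nat) (p q : Int)
    (hp : p = -1 ∨ 0 ≤ p ∧ p < (n : Int)) (hq : q = -1 ∨ 0 ≤ q ∧ q < (n : Int)) :
    cmSlot n p = cmSlot n q ↔ p = q := by
  unfold cmSlot
  rcases hp with rfl | ⟨hp0, hp1⟩ <;> rcases hq with rfl | ⟨hq0, hq1⟩
  · simp
  · rw [if_pos (by omega), if_neg (by omega)]; constructor <;> intro h <;> omega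
  · rw [if_neg (by omega), if_pos (by omega)]; constructor <;> intro h <;> omega
  · rw [if_neg (by omega), if_neg (by omega)]; constructor <;> intro h <;> omega

-- ---------- children array characterisation ----------

theorem cmChildAt_cons (kp : Int × Int) (its : List (Int × Int)) (q : Int) :
    cmChildAt (kp :: its) q = (if kp.2 = q then [kp.1] else []) ++ cmChildAt its q := by
  by_cases h : kp.2 = q <;> simp [cmChildAt, h]

theorem cmChildAt_append (its : List (Int × Int)) (l p q : Int) :
    cmChildAt (its ++ [(l, p)]) q = cmChildAt its q ++ (if p = q then [l] else []) := by
  by_cases h : p = q <;> simp [cmChildAt, List.filter_append, h]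

theorem cmChildAt_mem {its : List (Int × Int)} {q k : Int} (h : k ∈ cmChildAt its q) :
    (k, q) ∈ its := by
  simp only [cmChildAt, List.mem_map] at h
  obtain ⟨⟨a, b⟩, hmem, rfl⟩ := h
  have := List.of_mem_filter hmem
  simp only [beq_iff_eq] at this
  subst this
  exact List.mem_of_mem_filter hmem

theorem cmChildrenA_go (n : Nat) :
    ∀ (its : List (Int × Int)) (arr : List (List Int)), arr.length = n + 1 →
      (∀ kp ∈ its, kp.2 = -1 ∨ 0 ≤ kp.2 ∧ kp.2 < (n : Int)) →
      (its.foldl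
          (fun ch kp => PySem.List.pySetD ch kp.2 (PySem.List.pyGetD ch kp.2 [] ++ [kp.1]))
          arr).length = n + 1 ∧
      ∀ q, (q = -1 ∨ 0 ≤ q ∧ q < (n : Int)) →
        PySem.List.pyGetD (its.foldl
            (fun ch kp => PySem.List.pySetD ch kp.2 (PySem.List.pyGetD ch kp.2 [] ++ [kp.1]))
            arr) q []
          = PySem.List.pyGetD arr q [] ++ cmChildAt its q := by
  intro its
  induction its with
  | nil => intro arr hlen _; exact ⟨hlen, fun q _ => by simp [cmChildAt]⟩
  | cons kp rest ih =>
    intro arr hlen H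
    have hkp := H kp (List.mem_cons_self)
    have hset : PySem.List.pySetD arr kp.2 (PySem.List.pyGetD arr kp.2 [] ++ [kp.1])
        = arr.set (cmSlot n kp.2) (PySem.List.pyGetD arr kp.2 [] ++ [kp.1]) :=
      cm_pySetD_slot arr n kp.2 _ hlen hkp
    have hlen' : (arr.set (cmSlot n kp.2) (PySem.List.pyGetD arr kp.2 [] ++ [kp.1])).length
        = n + 1 := by simp [hlen]
    obtain ⟨ihlen, ihget⟩ := ih (arr.set (cmSlot n kp.2) (PySem.List.pyGetD arr kp.2 [] ++ [kp.1]))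
      hlen' (fun x hx => H x (List.mem_cons_of_mem _ hx))
    refine ⟨by simpa [List.foldl_cons, hset] using ihlen, fun q hq => ?_⟩
    rw [List.foldl_cons, hset, ihget q hq, cmChildAt_cons]
    have hget : PySem.List.pyGetD
        (arr.set (cmSlot n kp.2) (PySem.List.pyGetD arr kp.2 [] ++ [kp.1])) q []
        = (arr.set (cmSlot n kp.2) (PySem.List.pyGetD arr kp.2 [] ++ [kp.1])).getD (cmSlot n q) [] :=
      cm_pyGetD_slot _ n q [] hlen' hq
    rw [hget]
    have hb : cmSlot n kp.2 < arr.length := by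
      rcases hkp with h' | ⟨h0, h1⟩
      · rw [h']; simp [cmSlot, hlen]
      · unfold cmSlot; rw [if_neg (by omega)]; omega
    by_cases h : kp.2 = q
    · subst h
      rw [List.getD_eq_getElem?_getD, List.getElem?_set_self hb]
      rw [cm_pyGetD_slot arr n kp.2 [] hlen hkp]
      simp
    · have hsl : cmSlot n kp.2 ≠ cmSlot n q := fun hc => h ((cmSlot_inj n kp.2 q hkp hq).1 hc)
      rw [List.getD_eq_getElem?_getD, List.getElem?_set_ne hsl,
        cm_pyGetD_slot arr n q [] hlen hq, List.getD_eq_getElem?_getD, if_neg h]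
      simp

theorem cmChildrenA_spec (n : Nat) (its : List (Int × Int))
    (H : ∀ kp ∈ its, kp.2 = -1 ∨ 0 ≤ kp.2 ∧ kp.2 < (n : Int)) :
    ∀ q, (q = -1 ∨ 0 ≤ q ∧ q < (n : Int)) →
      PySem.List.pyGetD (cmChildrenA n its) q [] = cmChildAt its q := by
  intro q hq
  have := (cmChildrenA_go n its (List.replicate (n + 1) []) (by simp) H).2 q hq
  rw [cmChildrenA, this, cm_pyGetD_slot _ n q [] (by simp) hq]
  simp

-- ---------- cmVisit: fuel irrelevance and stability under appending a fresh pair ----------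

theorem cmVisit_fuel (its : List (Int × Int)) (n : Nat)
    (H : ∀ kp ∈ its, 0 ≤ kp.1 ∧ kp.1 < (n : Int) ∧ kp.2 < kp.1) :
    ∀ (f : Nat), ∀ (g : Nat) (l : Int), l < (n : Int) →
      (n : Int) < (f : Int) + l → (n : Int) < (g : Int) + l →
      cmVisit its f l = cmVisit its g l := by
  intro f
  induction f with
  | zero => intro g l hln hf _; exact absurd hf (by push_cast; omega)
  | succ f ih =>
    intro g l hln hf hg
    match g with
    | 0 => exact absurd hg (by push_cast; omega)
    | g + 1 =>
      simp only [cmVisit]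
      congr 1
      apply List.flatMap_congr
      intro c hc
      obtain ⟨h0, h1, h2⟩ := H (c, l) (cmChildAt_mem hc)
      exact (ih f c h1 (by push_cast at hf ⊢; omega) (by push_cast at hf ⊢; omega)).trans
        (ih g c h1 (by push_cast at hf ⊢; omega) (by push_cast at hg ⊢; omega))

theorem cmVisit_append (its : List (Int × Int)) (l p : Int)
    (Hk : ∀ kp ∈ its, kp.1 ≠ p) :
    ∀ (f : Nat) (c : Int), c ≠ p → cmVisit (its ++ [(l, p)]) f c = cmVisit its f c := by
  intro f
  induction f with
  | zero => intro c _; rfl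
  | succ f ih =>
    intro c hc
    simp only [cmVisit, cmChildAt_append, if_neg (fun h : p = c => hc h.symm), List.append_nil]
    congr 1
    apply List.flatMap_congr
    intro k hk
    exact ih k (Hk (k, c) (cmChildAt_mem hk))

-- ---------- dfs computes the post-order fold ----------

theorem cmDfsA_eq (children : List (List Int)) (m : List Int) (n : Nat) (its : List (Int × Int))
    (harr : ∀ q, (q = -1 ∨ 0 ≤ q ∧ q < (n : Int)) →
      PySem.List.pyGetD children q [] = cmChildAt its q)
    (H : ∀ kp ∈ its, 0 ≤ kp.1 ∧ kp.1 < (n : Int)) :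
    ∀ (f : Nat) (l : Int) (res : PySem.Dict String Int), 0 ≤ l → l < (n : Int) →
      cmDfsA children m f l res = (cmVisit its f l).foldl (cmClassifyA children m) res := by
  intro f
  induction f with
  | zero => intro l res _ _; rfl
  | succ f ih =>
    intro l res hl0 hln
    simp only [cmDfsA, cmVisit]
    rw [harr l (Or.inr ⟨hl0, hln⟩), if_pos (by omega), List.foldl_append]
    simp only [List.foldl_cons, List.foldl_nil]
    congr 1
    rw [List.foldl_flatMap]
    apply PySem.List.foldl_congr_mem
    intro r c hc
    obtain ⟨h0, h1⟩ := H (c, l) (cmChildAt_mem hc)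
    exact ih c r h0 h1

-- ---------- the parse invariant ----------

def cmInit (cs : List Char) : Option (List Int × PySem.Dict Int Int × List Int) :=
  some ([-1], PySem.Dict.empty, PySem.List.pyRange 0 (cs.length : Int) 1)

def cmStateAt (cs : List Char) (i : Nat) : Option (List Int × PySem.Dict Int Int × List Int) :=
  (PySem.List.enumerate (cs.take i) 0).foldl cmParseStepA (cmInit cs)

def cmStateBAt (cs : List Char) (i : Nat) :
    Option ((Int × Int × Int × Int × Int × Int) × List Int × List (Int × Int × Int)) :=
  (PySem.List.enumerate (cs.take i) 0).foldl cmStepB (some (cmCnt0, [], [(0, -1, -1)]))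

def cmInv (cs : List Char) (i : Nat) (front : List Int) (par : PySem.Dict Int Int) : Prop :=
  List.Pairwise (· > ·) (front ++ [-1]) ∧
  (∀ x ∈ front, 0 ≤ x ∧ x < (i : Int)) ∧
  (∀ kp ∈ par.items, 0 ≤ kp.1 ∧ kp.1 < (i : Int) ∧ -1 ≤ kp.2 ∧ kp.2 < kp.1) ∧
  (∀ kp ∈ par.items, kp.1 ∉ front ++ [-1]) ∧
  par.keys.Nodup ∧
  (cs.take i).countP (· == '(') = front.length + (cs.take i).countP (· == ')') ∧
  ((front ++ [-1]).reverse).flatMap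
      (fun q => (cmChildAt par.items q).flatMap (cmVisit par.items (cs.length + 2)))
    = par.keys

theorem cmChildAt_eq_nil {its : List (Int × Int)} {q : Int}
    (h : ∀ kp ∈ its, kp.2 ≠ q) : cmChildAt its q = [] := by
  have : its.filter (fun kp => kp.2 == q) = [] :=
    List.filter_eq_nil_iff.2 (fun kp hkp => by simpa using h kp hkp)
  simp [cmChildAt, this]

theorem cmInv_hold (cs : List Char)
    (hPre : ∀ j < cs.length + 1,
      (cs.take j).countP (· == ')') ≤ (cs.take j).countP (· == '(')) :
    ∀ i, i ≤ cs.length → ∃ front par m,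
      cmStateAt cs i = some (front ++ [-1], par, m) ∧ cmInv cs i front par := by
  intro i
  induction i with
  | zero =>
    intro _
    refine ⟨[], PySem.Dict.empty, PySem.List.pyRange 0 (cs.length : Int) 1, rfl, ?_⟩
    refine ⟨by simp, by simp, ?_, ?_, ?_, by simp, ?_⟩
    · intro kp hkp; simp [PySem.Dict.empty] at hkp
    · intro kp hkp; simp [PySem.Dict.empty] at hkp
    · simp [PySem.Dict.keys, PySem.Dict.empty]
    · simp [PySem.Dict.keys, PySem.Dict.empty, cmChildAt]
  | succ i ih =>
    intro hi1
    have hi : i < cs.length := by omega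
    obtain ⟨front, par, m, hstate, hpw, hfr, hit, hnst, hnd, hcnt, hcat⟩ := ih (by omega)
    have hstep : cmStateAt cs (i + 1) = cmParseStepA (cmStateAt cs i) ((i : Int), cs[i]) := by
      unfold cmStateAt
      rw [List.take_add_one, List.getElem?_eq_getElem hi]
      rw [PySem.List.enumerate_append]
      simp [List.length_take, Nat.min_eq_left (le_of_lt hi), PySem.List.enumerate_cons,
        PySem.List.enumerate_nil, List.foldl_append]
    rw [hstate] at hstep
    by_cases hop : cs[i] = '('
    · -- push
      refine ⟨(i : Int) :: front, par, m, ?_, ?_, ?_, ?_, ?_, hnd, ?_, ?_⟩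
      · rw [hstep, hop]; rfl
      · refine List.pairwise_cons.2 ⟨?_, hpw⟩
        intro x hx
        rcases List.mem_append.1 hx with hx | hx
        · exact (hfr x hx).2
        · simp at hx; omega
      · intro x hx
        rcases List.mem_cons.1 hx with rfl | hx
        · exact ⟨by positivity, by omega⟩
        · have := hfr x hx; push_cast at this ⊢; omega
      · intro kp hkp; have := hit kp hkp; push_cast at this ⊢; omega
      · intro kp hkp
        have h1 := hnst kp hkp
        have h2 := (hit kp hkp).2.1
        intro hmem
        rcases List.mem_cons.1 hmem with he | hmem
        · omega
        · exact h1 hmem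
      · rw [List.take_add_one, List.getElem?_eq_getElem hi, hop]
        simp only [Option.toList_some, List.countP_append, List.countP_singleton]
        norm_num
        rw [hcnt]
        simp
        omega
      · have hch : cmChildAt par.items (i : Int) = [] :=
          cmChildAt_eq_nil (fun kp hkp => by have := hit kp hkp; omega)
        calc (((i : Int) :: front ++ [-1]).reverse).flatMap
              (fun q => (cmChildAt par.items q).flatMap (cmVisit par.items (cs.length + 2)))
            = ((front ++ [-1]).reverse).flatMap
              (fun q => (cmChildAt par.items q).flatMap (cmVisit par.items (cs.length + 2)))
              ++ (cmChildAt par.items (i : Int)).flatMap (cmVisit par.items (cs.length + 2)) := by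
              simp
          _ = par.keys := by rw [hch, hcat]; simp
    · by_cases hcl : cs[i] = ')'
      · -- pop and record the pair
        have hcnt1 : (cs.take (i+1)).countP (· == '(')
            = (cs.take i).countP (· == '(') := by
          rw [List.take_add_one, List.getElem?_eq_getElem hi, hcl]
          simp
        have hcnt2 : (cs.take (i+1)).countP (· == ')')
            = (cs.take i).countP (· == ')') + 1 := by
          rw [List.take_add_one, List.getElem?_eq_getElem hi, hcl]
          simp
        have hfne : front ≠ [] := by
          intro hempty
          have := hPre (i+1) (by omega)
          rw [hcnt1, hcnt2] at this
          rw [hempty] at hcnt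
          simp at hcnt
          omega
        obtain ⟨l, front', rfl⟩ : ∃ l front', front = l :: front' := by
          cases front with
          | nil => exact absurd rfl hfne
          | cons a t => exact ⟨a, t, rfl⟩
        obtain ⟨p, rest', hrest⟩ : ∃ p rest', front' ++ [-1] = p :: rest' := by
          cases front' with
          | nil => exact ⟨-1, [], rfl⟩
          | cons a t => exact ⟨a, t ++ [-1], rfl⟩
        have hstep' : cmStateAt cs (i + 1)
            = some (front' ++ [-1], par.insert l p,
                PySem.List.pySetD (PySem.List.pySetD m (i : Int) l) l (i : Int)) := by
          rw [hstep]
          show (if cs[i] = '(' then _ else _) = _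
          rw [if_neg hop, if_pos hcl]
          rw [List.cons_append, hrest]
          rfl
        have hpw' : List.Pairwise (fun a b => a > b) (front' ++ [-1]) :=
          (List.pairwise_cons.1 hpw).2
        have hlgt : ∀ x ∈ front' ++ [-1], l > x := (List.pairwise_cons.1 hpw).1
        have hpmem : p ∈ front' ++ [-1] := by rw [hrest]; exact List.mem_cons_self
        have hlnotin : l ∉ front' ++ [-1] := fun hmem => by have := hlgt l hmem; omega
        have hlkeys : l ∉ par.keys := by
          intro hmem
          simp only [PySem.Dict.keys, List.mem_map] at hmem
          obtain ⟨kp, hkp, hfst⟩ := hmem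
          exact (hnst kp hkp) (by rw [hfst]; exact List.mem_cons_self)
        have hcontains : par.contains l = false := by
          rcases hb : par.contains l with _ | _
          · rfl
          · exact absurd ((PySem.Dict.contains_iff_mem_keys par l).1 hb) hlkeys
        have hitems' : (par.insert l p).items = par.items ++ [(l, p)] :=
          PySem.Dict.items_insert_of_not_contains par p hcontains
        have hkeys' : (par.insert l p).keys = par.keys ++ [l] := by
          simp [PySem.Dict.keys, hitems']
        have hl0 : (0:Int) ≤ l := (hfr l List.mem_cons_self).1
        have hli : l < (i : Int) := (hfr l List.mem_cons_self).2
        have hp1 : (-1:Int) ≤ p := by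
          rcases List.mem_append.1 hpmem with hx | hx
          · have := hfr p (List.mem_cons_of_mem _ hx); omega
          · simp at hx; omega
        have hpl : p < l := hlgt p hpmem
        refine ⟨front', par.insert l p, _, hstep', hpw', ?_, ?_, ?_, ?_, ?_, ?_⟩
        · intro x hx
          have := hfr x (List.mem_cons_of_mem _ hx); push_cast at this ⊢; omega
        · intro kp hkp
          rw [hitems'] at hkp
          rcases List.mem_append.1 hkp with hkp | hkp
          · have := hit kp hkp; push_cast at this ⊢; omega
          · simp at hkp; rw [hkp]; push_cast; omega
        · intro kp hkp
          rw [hitems'] at hkp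
          rcases List.mem_append.1 hkp with hkp | hkp
          · exact fun hmem => (hnst kp hkp) (List.mem_cons_of_mem _ hmem)
          · simp at hkp; rw [hkp]; exact hlnotin
        · rw [hkeys']
          simp only [List.nodup_append, List.nodup_cons, List.nodup_nil]
          refine ⟨hnd, by simp, ?_⟩
          intro a ha b hb
          simp only [List.mem_cons, List.not_mem_nil, or_false] at hb
          subst hb
          exact fun he => hlkeys (he ▸ ha)
        · rw [hcnt1, hcnt2, hcnt]
          simp only [List.length_cons]
          omega
        · rw [hitems', hkeys', hrest]
          have hkeyne : ∀ kp ∈ par.items, kp.1 ≠ p := by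
            intro kp hkp he
            exact (hnst kp hkp) (List.mem_cons_of_mem _ (he ▸ hpmem))
          have hH : ∀ kp ∈ par.items, 0 ≤ kp.1 ∧ kp.1 < (cs.length : Int) ∧ kp.2 < kp.1 := by
            intro kp hkp
            obtain ⟨h1, h2, _, h4⟩ := hit kp hkp
            refine ⟨h1, ?_, h4⟩
            have : (i : Int) ≤ (cs.length : Int) := by omega
            omega
          have hpll : ¬ (p = l) := by omega
          have hchild : ∀ q, ¬ (p = q) →
              cmChildAt (par.items ++ [(l, p)]) q = cmChildAt par.items q := by
            intro q hq; rw [cmChildAt_append, if_neg hq]; simp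
          have hvis : ∀ (f : Nat) (c : Int), c ≠ p →
              cmVisit (par.items ++ [(l, p)]) f c = cmVisit par.items f c :=
            cmVisit_append par.items l p hkeyne
          have hmemchild : ∀ q c, c ∈ cmChildAt par.items q →
              c ≠ p ∧ 0 ≤ c ∧ c < (cs.length : Int) := by
            intro q c hc
            have hmem := cmChildAt_mem hc
            exact ⟨hkeyne _ hmem, (hH _ hmem).1, (hH _ hmem).2.1⟩
          have hg : ∀ q, ¬ (p = q) →
              List.flatMap (cmVisit (par.items ++ [(l, p)]) (cs.length + 2))
                  (cmChildAt (par.items ++ [(l, p)]) q)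
                = List.flatMap (cmVisit par.items (cs.length + 2)) (cmChildAt par.items q) := by
            intro q hq
            rw [hchild q hq]
            exact List.flatMap_congr (fun c hc => hvis _ c (hmemchild q c hc).1)
          have hvl : cmVisit (par.items ++ [(l, p)]) (cs.length + 2) l
              = List.flatMap (cmVisit par.items (cs.length + 2)) (cmChildAt par.items l)
                ++ [l] := by
            rw [show cmVisit (par.items ++ [(l, p)]) (cs.length + 2) l
                  = (cmChildAt (par.items ++ [(l, p)]) l).flatMap
                      (cmVisit (par.items ++ [(l, p)]) (cs.length + 1)) ++ [l] from rfl,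
                hchild l hpll]
            congr 1
            apply List.flatMap_congr
            intro c hc
            obtain ⟨hcp, hc0, hcn⟩ := hmemchild l c hc
            rw [hvis _ c hcp]
            exact cmVisit_fuel par.items cs.length hH (cs.length + 1) (cs.length + 2) c hcn
              (by push_cast; omega) (by push_cast; omega)
          have hgp : List.flatMap (cmVisit (par.items ++ [(l, p)]) (cs.length + 2))
                  (cmChildAt (par.items ++ [(l, p)]) p)
              = List.flatMap (cmVisit par.items (cs.length + 2)) (cmChildAt par.items p)
                ++ (List.flatMap (cmVisit par.items (cs.length + 2)) (cmChildAt par.items l)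
                  ++ [l]) := by
            rw [cmChildAt_append, if_pos rfl, List.flatMap_append]
            congr 1
            · exact List.flatMap_congr (fun c hc => hvis _ c (hmemchild p c hc).1)
            · simp [hvl]
          have hppw : ∀ q ∈ rest', p > q := (List.pairwise_cons.1 (hrest ▸ hpw')).1
          have hcat2 : (List.flatMap (fun q => List.flatMap (cmVisit par.items (cs.length + 2))
                  (cmChildAt par.items q)) rest'.reverse
                ++ List.flatMap (cmVisit par.items (cs.length + 2)) (cmChildAt par.items p))
                ++ List.flatMap (cmVisit par.items (cs.length + 2)) (cmChildAt par.items l)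
              = par.keys := by
            rw [List.cons_append, hrest] at hcat
            simpa [List.flatMap_append, List.append_assoc] using hcat
          rw [List.reverse_cons, List.flatMap_append]
          have hrest'eq : List.flatMap (fun q => List.flatMap
                (cmVisit (par.items ++ [(l, p)]) (cs.length + 2))
                (cmChildAt (par.items ++ [(l, p)]) q)) rest'.reverse
              = List.flatMap (fun q => List.flatMap (cmVisit par.items (cs.length + 2))
                (cmChildAt par.items q)) rest'.reverse := by
            apply List.flatMap_congr
            intro q hq
            exact hg q (by have := hppw q (List.mem_reverse.1 hq); omega)
          rw [hrest'eq]
          simp only [List.flatMap_singleton, hgp]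
          rw [← hcat2]
          simp [List.append_assoc]
      · -- other character: state unchanged
        refine ⟨front, par, m, ?_, hpw, ?_, ?_, hnst, hnd, ?_, hcat⟩
        · rw [hstep]
          show (if cs[i] = '(' then _ else _) = _
          rw [if_neg hop, if_neg hcl]
        · intro x hx; have := hfr x hx; push_cast at this ⊢; omega
        · intro kp hkp; have := hit kp hkp; push_cast at this ⊢; omega
        · rw [List.take_add_one, List.getElem?_eq_getElem hi]
          simp only [Option.toList_some, List.countP_append, List.countP_singleton]
          have e1 : (cs[i] == '(') = false := by simpa using hop
          have e2 : (cs[i] == ')') = false := by simpa using hcl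
          rw [e1, e2, hcnt]
          simp

-- ---------- closing positions ----------

theorem cmCloseOf_append (pl : List (Int × Int)) (l i c : Int)
    (h : c ∈ pl.map Prod.fst) : cmCloseOf (pl ++ [(l, i)]) c = cmCloseOf pl c := by
  obtain ⟨pr, hpr, hc⟩ := List.mem_map.1 h
  have hs : (pl.find? (fun pr => pr.1 == c)).isSome :=
    List.find?_isSome.2 ⟨pr, hpr, by simp [hc]⟩
  obtain ⟨v, hv⟩ := Option.isSome_iff_exists.1 hs
  unfold cmCloseOf
  rw [List.find?_append, hv]
  rfl

theorem cmCloseOf_append_self (pl : List (Int × Int)) (l i : Int)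
    (h : l ∉ pl.map Prod.fst) : cmCloseOf (pl ++ [(l, i)]) l = i := by
  have hn : pl.find? (fun pr => pr.1 == l) = none := by
    rw [List.find?_eq_none]
    intro pr hpr hpred
    exact h (List.mem_map.2 ⟨pr, hpr, by simpa using hpred⟩)
  unfold cmCloseOf
  rw [List.find?_append, hn]
  simp

theorem cmCloseOf_of_mem (pl : List (Int × Int)) (hnd : (pl.map Prod.fst).Nodup)
    (pr : Int × Int) (hpr : pr ∈ pl) : cmCloseOf pl pr.1 = pr.2 := by
  have hs : (pl.find? (fun x => x.1 == pr.1)).isSome :=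
    List.find?_isSome.2 ⟨pr, hpr, by simp⟩
  obtain ⟨v, hv⟩ := Option.isSome_iff_exists.1 hs
  have hmem := List.mem_of_find?_eq_some hv
  have hpred : v.1 = pr.1 := by simpa using List.find?_some hv
  have : v = pr := List.inj_on_of_nodup_map hnd hmem hpr hpred
  unfold cmCloseOf
  rw [hv, this]
  rfl

-- ---------- stability of cmFrameOf under closing one more pair ----------

theorem cmFrameOf_stable (its pl : List (Int × Int)) (l p i q : Int)
    (hpq : ¬ (p = q))
    (hch : ∀ c ∈ cmChildAt its q, c ∈ pl.map Prod.fst) :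
    cmFrameOf (its ++ [(l, p)]) (pl ++ [(l, i)]) q = cmFrameOf its pl q := by
  unfold cmFrameOf
  rw [cmChildAt_append, if_neg hpq, List.append_nil]
  cases h : cmChildAt its q with
  | nil => rfl
  | cons c0 t =>
    have := cmCloseOf_append pl l i c0 (hch c0 (by rw [h]; exact List.mem_cons_self))
    simp [this]

theorem cmFrameOf_close_parent (its pl : List (Int × Int)) (l p i : Int)
    (hl : l ∉ pl.map Prod.fst)
    (hch : ∀ c ∈ cmChildAt its p, c ∈ pl.map Prod.fst) :
    cmFrameOf (its ++ [(l, p)]) (pl ++ [(l, i)]) p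
      = if (cmFrameOf its pl p).1 = 0
        then ((cmFrameOf its pl p).1 + 1, l, i)
        else ((cmFrameOf its pl p).1 + 1, (cmFrameOf its pl p).2.1,
              (cmFrameOf its pl p).2.2) := by
  unfold cmFrameOf
  rw [cmChildAt_append, if_pos rfl]
  cases h : cmChildAt its p with
  | nil =>
    rw [List.nil_append]
    simp [cmCloseOf_append_self pl l i hl]
  | cons c0 t =>
    have hcl := cmCloseOf_append pl l i c0 (hch c0 (by rw [h]; exact List.mem_cons_self))
    have hne : ¬ ((t.length : Int) + 1 = 0) := by omega
    rw [List.cons_append]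
    simp only [hcl, if_neg hne]
    have hlen : ((t ++ [l]).length : Int) + 1 = (t.length : Int) + 1 + 1 := by
      simp [List.length_append]
    rw [hlen]

-- ---------- matching the A and B machine states ----------

theorem cm_snoc_inj {l1 l2 : List Int} (h : l1 ++ [-1] = l2 ++ [-1]) : l1 = l2 := by
  have := congrArg List.dropLast h
  simpa [List.dropLast_concat] using this

theorem cmInv_of_state (cs : List Char)
    (hPre : ∀ j < cs.length + 1,
      (cs.take j).countP (· == ')') ≤ (cs.take j).countP (· == '(')) (i : Nat)
    (hi : i ≤ cs.length) (front : List Int) (par : PySem.Dict Int Int) (m : List Int)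
    (h : cmStateAt cs i = some (front ++ [-1], par, m)) : cmInv cs i front par := by
  obtain ⟨f2, p2, m2, hs2, hi2⟩ := cmInv_hold cs hPre i hi
  rw [h] at hs2
  have h' : (front ++ [-1], par, m) = (f2 ++ [-1], p2, m2) := by
    exact Option.some.inj hs2
  have hf : front = f2 := cm_snoc_inj (congrArg (fun t => t.1) h')
  have hp : par = p2 := congrArg (fun t => t.2.1) h'
  rw [hf, hp]
  exact hi2

-- ---------- the combined invariant: A's and B's machine states in lockstep ----------

theorem cmInv2_hold (cs : List Char)
    (hPre : ∀ j < cs.length + 1,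
      (cs.take j).countP (· == ')') ≤ (cs.take j).countP (· == '(')) :
    ∀ i, i ≤ cs.length → ∃ front par m pl,
      cmStateAt cs i = some (front ++ [-1], par, m) ∧ cmInv cs i front par ∧
      m.length = cs.length ∧
      pl.map Prod.fst = par.keys ∧
      (∀ pr ∈ pl, 0 ≤ pr.1 ∧ pr.1 < pr.2 ∧ pr.2 < (i : Int)) ∧
      (∀ pr ∈ pl, PySem.List.pyGetD m pr.1 0 = pr.2) ∧
      cmStateBAt cs i
        = some (cmCntOf par.items pl, front, (front ++ [-1]).map (cmFrameOf par.items pl)) := by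
  intro i
  induction i with
  | zero =>
    intro _
    refine ⟨[], PySem.Dict.empty, PySem.List.pyRange 0 (cs.length : Int) 1, [], rfl,
      cmInv_of_state cs hPre 0 (by omega) [] PySem.Dict.empty _ rfl, ?_, ?_, ?_, ?_, rfl⟩
    · simp [PySem.List.pyRange_zero_natCast]
    · simp [PySem.Dict.keys, PySem.Dict.empty]
    · intro pr hpr; simp at hpr
    · intro pr hpr; simp at hpr
  | succ i ih =>
    intro hi1
    have hi : i < cs.length := by omega
    obtain ⟨front, par, m, pl, hstate, hinv, hmlen, hplk, hplb, hplm, hstateB⟩ := ih (by omega)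
    obtain ⟨hpw, hfr, hit, hnst, hnd, hcnt, hcat⟩ := hinv
    have hstep : cmStateAt cs (i + 1) = cmParseStepA (cmStateAt cs i) ((i : Int), cs[i]) := by
      unfold cmStateAt
      rw [List.take_add_one, List.getElem?_eq_getElem hi]
      rw [PySem.List.enumerate_append]
      simp [List.length_take, Nat.min_eq_left (le_of_lt hi), PySem.List.enumerate_cons,
        PySem.List.enumerate_nil, List.foldl_append]
    have hstepB : cmStateBAt cs (i + 1) = cmStepB (cmStateBAt cs i) ((i : Int), cs[i]) := by
      unfold cmStateBAt
      rw [List.take_add_one, List.getElem?_eq_getElem hi]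
      rw [PySem.List.enumerate_append]
      simp [List.length_take, Nat.min_eq_left (le_of_lt hi), PySem.List.enumerate_cons,
        PySem.List.enumerate_nil, List.foldl_append]
    rw [hstate] at hstep
    rw [hstateB] at hstepB
    have hchsub : ∀ q : Int, ∀ c ∈ cmChildAt par.items q, c ∈ pl.map Prod.fst := by
      intro q c hc
      have hmem := cmChildAt_mem hc
      rw [hplk]
      simp only [PySem.Dict.keys, List.mem_map]
      exact ⟨(c, q), hmem, rfl⟩
    by_cases hop : cs[i] = '('
    · -- push
      have hA : cmStateAt cs (i + 1) = some ((i : Int) :: front ++ [-1], par, m) := by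
        rw [hstep, hop]; rfl
      have hfi : cmFrameOf par.items pl (i : Int) = (0, -1, -1) := by
        unfold cmFrameOf
        rw [cmChildAt_eq_nil (fun kp hkp => by have := hit kp hkp; omega)]
      refine ⟨(i : Int) :: front, par, m, pl, hA,
        cmInv_of_state cs hPre (i + 1) (by omega) _ _ _ hA, hmlen, hplk, ?_, hplm, ?_⟩
      · intro pr hpr; have := hplb pr hpr; push_cast at this ⊢; omega
      · rw [hstepB]
        have hcompute : cmStepB
            (some (cmCntOf par.items pl, front, (front ++ [-1]).map (cmFrameOf par.items pl)))
            ((i : Int), cs[i])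
            = some (cmCntOf par.items pl, (i : Int) :: front,
                (0, -1, -1) :: (front ++ [-1]).map (cmFrameOf par.items pl)) := by
          simp [cmStepB, hop]
        rw [hcompute]
        simp [List.cons_append, hfi]
    · by_cases hcl : cs[i] = ')'
      · -- pop: close the pair (l, i)
        have hcnt1 : (cs.take (i+1)).countP (· == '(')
            = (cs.take i).countP (· == '(') := by
          rw [List.take_add_one, List.getElem?_eq_getElem hi, hcl]
          simp
        have hcnt2 : (cs.take (i+1)).countP (· == ')')
            = (cs.take i).countP (· == ')') + 1 := by
          rw [List.take_add_one, List.getElem?_eq_getElem hi, hcl]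
          simp
        have hfne : front ≠ [] := by
          intro hempty
          have := hPre (i+1) (by omega)
          rw [hcnt1, hcnt2] at this
          rw [hempty] at hcnt
          simp at hcnt
          omega
        obtain ⟨l, front', rfl⟩ : ∃ l front', front = l :: front' := by
          cases front with
          | nil => exact absurd rfl hfne
          | cons a t => exact ⟨a, t, rfl⟩
        obtain ⟨p, rest', hrest⟩ : ∃ p rest', front' ++ [-1] = p :: rest' := by
          cases front' with
          | nil => exact ⟨-1, [], rfl⟩
          | cons a t => exact ⟨a, t ++ [-1], rfl⟩
        have hA : cmStateAt cs (i + 1)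
            = some (front' ++ [-1], par.insert l p,
                PySem.List.pySetD (PySem.List.pySetD m (i : Int) l) l (i : Int)) := by
          rw [hstep]
          show (if cs[i] = '(' then _ else _) = _
          rw [if_neg hop, if_pos hcl]
          rw [List.cons_append, hrest]
          rfl
        have hlgt : ∀ x ∈ front' ++ [-1], l > x := (List.pairwise_cons.1 hpw).1
        have hpmem : p ∈ front' ++ [-1] := by rw [hrest]; exact List.mem_cons_self
        have hlkeys : l ∉ par.keys := by
          intro hmem
          simp only [PySem.Dict.keys, List.mem_map] at hmem
          obtain ⟨kp, hkp, hfst⟩ := hmem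
          exact (hnst kp hkp) (by rw [hfst]; exact List.mem_cons_self)
        have hcontains : par.contains l = false := by
          rcases hb : par.contains l with _ | _
          · rfl
          · exact absurd ((PySem.Dict.contains_iff_mem_keys par l).1 hb) hlkeys
        have hitems' : (par.insert l p).items = par.items ++ [(l, p)] :=
          PySem.Dict.items_insert_of_not_contains par p hcontains
        have hkeys' : (par.insert l p).keys = par.keys ++ [l] := by
          simp [PySem.Dict.keys, hitems']
        have hl0 : (0:Int) ≤ l := (hfr l List.mem_cons_self).1
        have hli : l < (i : Int) := (hfr l List.mem_cons_self).2
        have hpl : p < l := hlgt p hpmem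
        have hlnotpl : l ∉ pl.map Prod.fst := by rw [hplk]; exact hlkeys
        have hpkeys : ∀ pr ∈ pl, ¬ (p = pr.1) := by
          intro pr hpr he
          have hmemk : pr.1 ∈ par.keys := by rw [← hplk]; exact List.mem_map.2 ⟨pr, hpr, rfl⟩
          simp only [PySem.Dict.keys, List.mem_map] at hmemk
          obtain ⟨kp, hkp, hfst⟩ := hmemk
          exact (hnst kp hkp) (by
            rw [hfst, ← he]
            exact List.mem_cons_of_mem _ hpmem)
        -- stability of the frames of still-open and already-closed positions
        have hstab : ∀ pr ∈ pl,
            cmFrameOf (par.items ++ [(l, p)]) (pl ++ [(l, (i : Int))]) pr.1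
              = cmFrameOf par.items pl pr.1 := by
          intro pr hpr
          exact cmFrameOf_stable par.items pl l p (i : Int) pr.1 (hpkeys pr hpr) (hchsub pr.1)
        have hstabl : cmFrameOf (par.items ++ [(l, p)]) (pl ++ [(l, (i : Int))]) l
              = cmFrameOf par.items pl l :=
          cmFrameOf_stable par.items pl l p (i : Int) l (by omega) (hchsub l)
        have hstabrest : ∀ q ∈ rest',
            cmFrameOf (par.items ++ [(l, p)]) (pl ++ [(l, (i : Int))]) q
              = cmFrameOf par.items pl q := by
          intro q hq
          have hppw : p > q := (List.pairwise_cons.1 (hrest ▸ (List.pairwise_cons.1 hpw).2)).1 q hq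
          exact cmFrameOf_stable par.items pl l p (i : Int) q (by omega) (hchsub q)
        -- B's step
        have hBcompute : cmStepB
            (some (cmCntOf par.items pl, l :: front',
              ((l :: front') ++ [-1]).map (cmFrameOf par.items pl)))
            ((i : Int), cs[i])
            = some (cmBumpB (cmCntOf par.items pl) l (i : Int)
                  (cmFrameOf par.items pl l).1 (cmFrameOf par.items pl l).2.1
                  (cmFrameOf par.items pl l).2.2,
                front',
                (if (cmFrameOf par.items pl p).1 = 0
                 then ((cmFrameOf par.items pl p).1 + 1, l, (i : Int))
                 else ((cmFrameOf par.items pl p).1 + 1, (cmFrameOf par.items pl p).2.1,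
                       (cmFrameOf par.items pl p).2.2))
                  :: rest'.map (cmFrameOf par.items pl)) := by
          rw [List.cons_append, List.map_cons, hrest, List.map_cons]
          simp [cmStepB, hop, hcl]
        -- counters after the close
        have hcntB : cmCntOf (par.items ++ [(l, p)]) (pl ++ [(l, (i : Int))])
            = cmBumpB (cmCntOf par.items pl) l (i : Int)
                (cmFrameOf par.items pl l).1 (cmFrameOf par.items pl l).2.1
                (cmFrameOf par.items pl l).2.2 := by
          unfold cmCntOf
          rw [List.foldl_append]
          simp only [List.foldl_cons, List.foldl_nil]
          rw [hstabl]
          congr 1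
          apply PySem.List.foldl_congr_mem
          intro acc pr hpr
          rw [hstab pr hpr]
        -- updated frame list
        have hframes : (front' ++ [-1]).map
              (cmFrameOf (par.items ++ [(l, p)]) (pl ++ [(l, (i : Int))]))
            = (if (cmFrameOf par.items pl p).1 = 0
               then ((cmFrameOf par.items pl p).1 + 1, l, (i : Int))
               else ((cmFrameOf par.items pl p).1 + 1, (cmFrameOf par.items pl p).2.1,
                     (cmFrameOf par.items pl p).2.2))
                :: rest'.map (cmFrameOf par.items pl) := by
          rw [hrest, List.map_cons]
          congr 1
          · exact cmFrameOf_close_parent par.items pl l p (i : Int) hlnotpl (hchsub p)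
          · exact List.map_congr_left hstabrest
        -- the m array keeps every recorded closing position
        have hm2eq : PySem.List.pySetD (PySem.List.pySetD m (i : Int) l) l (i : Int)
            = (m.set (i : Int).toNat l).set l.toNat (i : Int) := by
          rw [PySem.List.pySetD_of_nonneg m l (by positivity), PySem.List.pySetD_of_nonneg _ (i : Int) hl0]
        have hmlen2 : ((m.set (i : Int).toNat l).set l.toNat (i : Int)).length = cs.length := by
          simp [hmlen]
        refine ⟨front', par.insert l p, _, pl ++ [(l, (i : Int))], hA,
          cmInv_of_state cs hPre (i + 1) (by omega) _ _ _ hA, by rw [hm2eq]; exact hmlen2,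
          ?_, ?_, ?_, ?_⟩
        · rw [hkeys', ← hplk]; simp
        · intro pr hpr
          rcases List.mem_append.1 hpr with hpr | hpr
          · have := hplb pr hpr; push_cast at this ⊢; omega
          · simp at hpr; rw [hpr]; push_cast; omega
        · intro pr hpr
          rw [hm2eq]
          rcases List.mem_append.1 hpr with hpr | hpr
          · obtain ⟨h1, h2, h3⟩ := hplb pr hpr
            have hlt : pr.1.toNat < ((m.set (i : Int).toNat l).set l.toNat (i : Int)).length := by
              rw [hmlen2]; omega
            have hne1 : l.toNat ≠ pr.1.toNat := by
              intro he
              exact (by rw [← hplk]; exact List.mem_map.2 ⟨pr, hpr, rfl⟩ : pr.1 ∈ par.keys) |>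
                (fun hm => hlkeys (by rwa [show l = pr.1 by omega]))
            have hne2 : (i : Int).toNat ≠ pr.1.toNat := by omega
            rw [PySem.List.pyGetD_eq_getElem _ 0 h1 (by omega),
              List.getElem_set_ne hne1, List.getElem_set_ne hne2,
              ← PySem.List.pyGetD_eq_getElem m 0 h1 (by rw [hmlen]; omega)]
            exact hplm pr hpr
          · simp only [List.mem_singleton] at hpr
            rw [hpr]
            have hlt : l.toNat < ((m.set (i : Int).toNat l).set l.toNat (i : Int)).length := by
              rw [hmlen2]; omega
            rw [PySem.List.pyGetD_eq_getElem _ 0 hl0 (by omega)]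
            simp only []
            rw [List.getElem_set_self]
        · rw [hstepB, hBcompute, hitems', hcntB, hframes]
      · -- other character: both machines keep their state
        have hA : cmStateAt cs (i + 1) = some (front ++ [-1], par, m) := by
          rw [hstep]
          show (if cs[i] = '(' then _ else _) = _
          rw [if_neg hop, if_neg hcl]
        refine ⟨front, par, m, pl, hA,
          cmInv_of_state cs hPre (i + 1) (by omega) _ _ _ hA, hmlen, hplk, ?_, hplm, ?_⟩
        · intro pr hpr; have := hplb pr hpr; push_cast at this ⊢; omega
        · rw [hstepB]
          have hcompute : cmStepB
              (some (cmCntOf par.items pl, front, (front ++ [-1]).map (cmFrameOf par.items pl)))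
              ((i : Int), cs[i])
              = some (cmCntOf par.items pl, front,
                  (front ++ [-1]).map (cmFrameOf par.items pl)) := by
            simp [cmStepB, hop, hcl]
          rw [hcompute]

-- ---------- A's classification step on the counter dict ----------

theorem cmClassify_dict (children : List (List Int)) (m : List Int) (its pl : List (Int × Int))
    (l r : Int) (c : Int × Int × Int × Int × Int × Int)
    (hch : PySem.List.pyGetD children l [] = cmChildAt its l)
    (hml : PySem.List.pyGetD m l 0 = r)
    (hmc : ∀ c0 ∈ cmChildAt its l, PySem.List.pyGetD m c0 0 = cmCloseOf pl c0) :
    cmClassifyA children m (cmDictOf6 c) l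
      = cmDictOf6 (cmBumpB c l r (cmFrameOf its pl l).1 (cmFrameOf its pl l).2.1
          (cmFrameOf its pl l).2.2) := by
  obtain ⟨p, h, s, b, itl, mu⟩ := c
  unfold cmClassifyA cmFrameOf cmBumpB
  rw [hch, hml]
  cases hcl : cmChildAt its l with
  | nil =>
    simp [cmDictOf6, PySem.Dict.insert, PySem.Dict.getD, PySem.Dict.get?, PySem.Dict.contains]
  | cons c0 t =>
    have hm0 : PySem.List.pyGetD m c0 0 = cmCloseOf pl c0 :=
      hmc c0 (by rw [hcl]; exact List.mem_cons_self)
    cases t with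
    | nil =>
      simp only [List.length_cons, List.length_nil, PySem.List.pyGetD_zero_cons, hm0]
      split_ifs <;> first
        | contradiction
        | omega
        | simp [cmDictOf6, PySem.Dict.insert, PySem.Dict.getD, PySem.Dict.get?,
            PySem.Dict.contains]
    | cons c1 t' =>
      simp only [List.length_cons, List.length_nil, PySem.List.pyGetD_zero_cons, hm0]
      split_ifs <;> first
        | contradiction
        | omega
        | simp [cmDictOf6, PySem.Dict.insert, PySem.Dict.getD, PySem.Dict.get?,
            PySem.Dict.contains]

theorem cmFold_dict (children : List (List Int)) (m : List Int)
    (F : Int → Int × Int × Int) (pl : List (Int × Int))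
    (hkey : ∀ pr ∈ pl, ∀ c, cmClassifyA children m (cmDictOf6 c) pr.1
      = cmDictOf6 (cmBumpB c pr.1 pr.2 (F pr.1).1 (F pr.1).2.1 (F pr.1).2.2)) :
    ∀ c, (pl.map Prod.fst).foldl (cmClassifyA children m) (cmDictOf6 c)
      = cmDictOf6 (pl.foldl
          (fun c pr => cmBumpB c pr.1 pr.2 (F pr.1).1 (F pr.1).2.1 (F pr.1).2.2) c) := by
  induction pl with
  | nil => intro c; rfl
  | cons pr rest ih =>
    intro c
    simp only [List.map_cons, List.foldl_cons]
    rw [hkey pr List.mem_cons_self c]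
    exact ih (fun x hx => hkey x (List.mem_cons_of_mem _ hx)) _

-- ===== VERDICT (by name: the statement is the Claim_ definition above) =====
theorem count_motifs_spec : Claim_equal_count_motifs := by
  intro db _ hpre
  unfold Spec_count_motifs
  obtain ⟨hpre1, hpre2⟩ := hpre
  obtain ⟨front, par, m, pl, hstate, hinv, hmlen, hplk, hplb, hplm, hstateB⟩ :=
    cmInv2_hold db.toList hpre1 db.toList.length le_rfl
  obtain ⟨hpw, hfr, hit, hnst, hnd, hcnt, hcat⟩ := hinv
  rw [List.take_length] at hcnt
  have hfront : front = [] := by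
    have : front.length = 0 := by omega
    exact List.length_eq_zero_iff.1 this
  subst hfront
  have hparse : cmParseA db = some ([-1], par, m) := by
    have : cmStateAt db.toList db.toList.length = cmParseA db := by
      unfold cmStateAt cmParseA cmInit
      rw [List.take_length]
    rw [← this, hstate]
    rfl
  have hfoldB : (PySem.List.enumerate db.toList 0).foldl cmStepB
      (some ((0, 0, 0, 0, 0, 0), [], [(0, -1, -1)]))
      = some (cmCntOf par.items pl, [],
          ([] ++ [-1]).map (cmFrameOf par.items pl)) := by
    have : cmStateBAt db.toList db.toList.length
        = (PySem.List.enumerate db.toList 0).foldl cmStepB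
            (some ((0, 0, 0, 0, 0, 0), [], [(0, -1, -1)])) := by
      unfold cmStateBAt cmCnt0
      rw [List.take_length]
    rw [← this, hstateB]
  have hroot : (cmChildAt par.items (-1)).flatMap (cmVisit par.items (db.toList.length + 2))
      = par.keys := by simpa using hcat
  have hitn : ∀ kp ∈ par.items, 0 ≤ kp.1 ∧ kp.1 < (db.toList.length : Int) := by
    intro kp hkp; have := hit kp hkp; exact ⟨this.1, this.2.1⟩
  have hitf : ∀ kp ∈ par.items, 0 ≤ kp.1 ∧ kp.1 < (db.toList.length : Int) ∧ kp.2 < kp.1 := by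
    intro kp hkp; have := hit kp hkp; exact ⟨this.1, this.2.1, this.2.2.2⟩
  have hH2 : ∀ kp ∈ par.items, kp.2 = -1 ∨ 0 ≤ kp.2 ∧ kp.2 < (db.toList.length : Int) := by
    intro kp hkp; have := hit kp hkp; omega
  have harr := cmChildrenA_spec db.toList.length par.items hH2
  have hkmem : ∀ l ∈ par.keys, 0 ≤ l ∧ l < (db.toList.length : Int) := by
    intro l hl
    simp only [PySem.Dict.keys, List.mem_map] at hl
    obtain ⟨kp, hkp, rfl⟩ := hl
    exact hitn kp hkp
  simp only [count_motifs, count_motifs_alt, hparse, hfoldB]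
  -- A's dfs is the post-order fold over par.keys
  have hdfs : cmDfsA (cmChildrenA db.toList.length par.items) m (db.toList.length + 2) (-1)
        (PySem.Dict.ofList [("pairs", 0), ("hairpin", 0), ("stack", 0),
          ("bulge", 0), ("internal", 0), ("multi", 0)])
      = par.keys.foldl (cmClassifyA (cmChildrenA db.toList.length par.items) m)
        (PySem.Dict.ofList [("pairs", 0), ("hairpin", 0), ("stack", 0),
          ("bulge", 0), ("internal", 0), ("multi", 0)]) := by
    have hunfold : cmDfsA (cmChildrenA db.toList.length par.items) m (db.toList.length + 2) (-1)
          (PySem.Dict.ofList [("pairs", 0), ("hairpin", 0), ("stack", 0),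
            ("bulge", 0), ("internal", 0), ("multi", 0)])
        = (PySem.List.pyGetD (cmChildrenA db.toList.length par.items) (-1) []).foldl
            (fun r c => cmDfsA (cmChildrenA db.toList.length par.items) m
              (db.toList.length + 1) c r)
            (PySem.Dict.ofList [("pairs", 0), ("hairpin", 0), ("stack", 0),
              ("bulge", 0), ("internal", 0), ("multi", 0)]) := by
      rfl
    rw [hunfold, harr (-1) (Or.inl rfl)]
    have hcong : (cmChildAt par.items (-1)).foldl
          (fun r c => cmDfsA (cmChildrenA db.toList.length par.items) m
            (db.toList.length + 1) c r)
          (PySem.Dict.ofList [("pairs", 0), ("hairpin", 0), ("stack", 0),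
            ("bulge", 0), ("internal", 0), ("multi", 0)])
        = (cmChildAt par.items (-1)).foldl
          (fun r c => (cmVisit par.items (db.toList.length + 2) c).foldl
            (cmClassifyA (cmChildrenA db.toList.length par.items) m) r)
          (PySem.Dict.ofList [("pairs", 0), ("hairpin", 0), ("stack", 0),
            ("bulge", 0), ("internal", 0), ("multi", 0)]) := by
      apply PySem.List.foldl_congr_mem
      intro r c hc
      have hmem := cmChildAt_mem hc
      obtain ⟨hc0, hcn⟩ := hitn _ hmem
      rw [cmDfsA_eq (cmChildrenA db.toList.length par.items) m db.toList.length par.items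
        harr hitn (db.toList.length + 1) c r hc0 hcn]
      congr 1
      exact cmVisit_fuel par.items db.toList.length hitf (db.toList.length + 1)
        (db.toList.length + 2) c hcn (by push_cast; omega) (by push_cast; omega)
    rw [hcong, ← List.foldl_flatMap, hroot]
  rw [hdfs]
  -- the fold over the keys is the counter fold over the closed pairs
  have hres0 : PySem.Dict.ofList [("pairs", (0:Int)), ("hairpin", 0), ("stack", 0),
      ("bulge", 0), ("internal", 0), ("multi", 0)] = cmDictOf6 (0, 0, 0, 0, 0, 0) := by decide
  have hfsts : ∀ pr ∈ pl, 0 ≤ pr.1 ∧ pr.1 < (db.toList.length : Int) := by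
    intro pr hpr
    have : pr.1 ∈ par.keys := by rw [← hplk]; exact List.mem_map.2 ⟨pr, hpr, rfl⟩
    exact hkmem pr.1 this
  have hndpl : (pl.map Prod.fst).Nodup := by rw [hplk]; exact hnd
  have hfold : par.keys.foldl (cmClassifyA (cmChildrenA db.toList.length par.items) m)
        (cmDictOf6 (0, 0, 0, 0, 0, 0))
      = cmDictOf6 (cmCntOf par.items pl) := by
    rw [← hplk]
    exact cmFold_dict (cmChildrenA db.toList.length par.items) m
      (fun q => cmFrameOf par.items pl q) pl
      (fun pr hpr c => by
        apply cmClassify_dict (cmChildrenA db.toList.length par.items) m par.items pl pr.1 pr.2 c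
          (harr pr.1 (Or.inr (hfsts pr hpr)))
          (hplm pr hpr)
        intro c0 hc0
        have hmem := cmChildAt_mem hc0
        have hc0k : c0 ∈ pl.map Prod.fst := by
          rw [hplk]
          simp only [PySem.Dict.keys, List.mem_map]
          exact ⟨(c0, pr.1), hmem, rfl⟩
        obtain ⟨pr', hpr', hfst⟩ := List.mem_map.1 hc0k
        rw [← hfst, hplm pr' hpr', cmCloseOf_of_mem pl hndpl pr' hpr']) _
  rw [hres0, hfold]
  -- both sides are now the same seven literal entries
  obtain ⟨P, H, S, B, I, M⟩ := cmCntOf par.items pl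
  simp [cmDictOf6, PySem.Dict.insert, PySem.Dict.getD, PySem.Dict.get?, PySem.Dict.contains,
    PySem.Dict.items]
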